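-- pv_equiv track=rewrite | github.com/Midhilesh4890/Leetcode-Problems | Google/Onsite/bombexplosions.py | max_explosion_radii
-- ===== SOURCE A (Python) =====
-- def max_explosion_radii(bombs):
--     n = len(bombs)
--     total_explosion = 0
--     removed = set()  # To track removed bomb indices
--
--     # Sort bombs by explosion radius in descending order
--     indexed_bombs = sorted(enumerate(bombs), key=lambda x: -x[1])
--
--     for i, radius in indexed_bombs:
--         if i in removed:
--             continue  # Skip if already removed
--
--         total_explosion += radius  # Add explosion radius
--         # Mark affected indices as removed
--         for j in range(max(0, i - radius), min(n, i + radius + 1)):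
--             removed.add(j)
--
--     return total_explosion
-- ===== SOURCE B (Python) =====
-- def max_explosion_radii(bombs):
--     total = 0
--     accepted = []  # (index, radius) of bombs that actually exploded
--     for i, radius in sorted(enumerate(bombs), key=lambda x: -x[1]):
--         if any(abs(i - j) <= r for j, r in accepted):
--             continue
--         total += radius
--         accepted.append((i, radius))
--     return total
-- ===== Notes on version B (the rewrite author's own statement) =====
-- stated objective: alternative
-- what changed: Replaces the removed-index set filled by range-marking with a list of accepted (index, radius) bombs and a coverage check |i-j| <= r_j against it, so no per-index marking loop exists.
import Mathlib
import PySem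

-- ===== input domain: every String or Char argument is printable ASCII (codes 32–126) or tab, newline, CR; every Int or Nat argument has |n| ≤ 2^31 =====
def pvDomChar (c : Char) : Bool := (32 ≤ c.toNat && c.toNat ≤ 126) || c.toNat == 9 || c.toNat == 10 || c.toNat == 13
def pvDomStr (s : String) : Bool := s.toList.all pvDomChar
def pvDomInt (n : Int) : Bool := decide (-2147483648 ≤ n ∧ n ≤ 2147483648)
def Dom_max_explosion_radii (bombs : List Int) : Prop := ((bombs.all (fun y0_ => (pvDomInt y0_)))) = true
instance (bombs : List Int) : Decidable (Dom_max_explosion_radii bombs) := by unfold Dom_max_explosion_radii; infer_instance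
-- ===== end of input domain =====

-- B replaces A's removed-index set (filled by an inner range-marking loop) with a list of
-- accepted bombs checked by |i-j| ≤ r_j; same return value, no speed claim.

-- ===== PORT A =====
-- loop body of A's 'for i, radius in indexed_bombs'
def maxExpA_step (n : Int) (st : Int × PySem.Set Int) (p : Int × Int) : Int × PySem.Set Int :=
  if PySem.Set.contains st.2 p.1 then st
  else (st.1 + p.2,
    (PySem.List.pyRange (max 0 (p.1 - p.2)) (min n (p.1 + p.2 + 1)) 1).foldl PySem.Set.add st.2)

def max_explosion_radii (bombs : List Int) : Int :=
  let n : Int := (bombs.length : Int)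
  let indexed_bombs := PySem.List.sorted (PySem.List.enumerate bombs) (fun x => -x.2) false
  (indexed_bombs.foldl (maxExpA_step n) (0, PySem.Set.empty)).1

-- ===== PORT B =====
-- loop body of B's 'for i, radius in sorted(...)'
def maxExpB_step (st : Int × List (Int × Int)) (p : Int × Int) : Int × List (Int × Int) :=
  if st.2.any (fun q => decide (|p.1 - q.1| ≤ q.2)) then st
  else (st.1 + p.2, st.2 ++ [(p.1, p.2)])

def max_explosion_radii_alt (bombs : List Int) : Int :=
  ((PySem.List.sorted (PySem.List.enumerate bombs) (fun x => -x.2) false).foldl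
    maxExpB_step (0, [])).1

-- ===== PRECONDITION & SPEC =====
def Spec_max_explosion_radii (bombs : List Int) (out : Int) : Prop := out = max_explosion_radii_alt bombs
instance (bombs : List Int) (out : Int) : Decidable (Spec_max_explosion_radii bombs out) := by unfold Spec_max_explosion_radii; infer_instance

-- ===== CLAIM (what is proved, stated in full; the proofs are below) =====
def Claim_equal_max_explosion_radii : Prop := ∀ (bombs : List Int), Dom_max_explosion_radii bombs → Spec_max_explosion_radii bombs (max_explosion_radii bombs)

-- ===== LEMMAS AND PROOFS =====

-- invariant: the removed set contains exactly the in-range indices covered by an accepted bomb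
lemma maxExp_loop_eq (n : Int) (L : List (Int × Int)) :
    ∀ (total : Int) (removed : PySem.Set Int) (acc : List (Int × Int)),
    (∀ p ∈ L, 0 ≤ p.1 ∧ p.1 < n) →
    (∀ j : Int, 0 ≤ j → j < n → (j ∈ removed ↔ ∃ q ∈ acc, |j - q.1| ≤ q.2)) →
    (L.foldl (maxExpA_step n) (total, removed)).1 = (L.foldl maxExpB_step (total, acc)).1 := by
  induction L with
  | nil => intro total removed acc _ _; rfl
  | cons p t ih =>
    intro total removed acc hmemL hinv
    have hp := hmemL p (List.mem_cons_self ..)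
    have hcond : (p.1 ∈ removed) ↔ (acc.any (fun q => decide (|p.1 - q.1| ≤ q.2)) = true) := by
      rw [hinv p.1 hp.1 hp.2]
      simp [List.any_eq_true]
    by_cases hmem : p.1 ∈ removed
    · have hb : acc.any (fun q => decide (|p.1 - q.1| ≤ q.2)) = true := hcond.mp hmem
      simp only [List.foldl_cons, maxExpA_step, maxExpB_step, hb, if_true,
        PySem.Set.contains_eq_listContains, List.contains_iff_mem, hmem]
      exact ih total removed acc (fun q hq => hmemL q (List.mem_cons_of_mem _ hq)) hinv
    · have hb : ¬ (acc.any (fun q => decide (|p.1 - q.1| ≤ q.2)) = true) := fun h => hmem (hcond.mpr h)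
      simp only [List.foldl_cons, maxExpA_step, maxExpB_step,
        PySem.Set.contains_eq_listContains, List.contains_iff_mem, hmem,
        Bool.false_eq_true, if_false, hb]
      apply ih (total + p.2) _ _ (fun q hq => hmemL q (List.mem_cons_of_mem _ hq))
      intro j hj0 hjn
      rw [← PySem.Set.update]
      rw [PySem.Set.mem_update, PySem.List.mem_pyRange_one, hinv j hj0 hjn]
      constructor
      · rintro (⟨q, hq, hle⟩ | hrange)
        · exact ⟨q, List.mem_append_left _ hq, hle⟩
        · refine ⟨(p.1, p.2), List.mem_append_right _ (by simp), ?_⟩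
          simp only [abs_le]; omega
      · rintro ⟨q, hq, hle⟩
        rcases List.mem_append.mp hq with hq | hq
        · exact Or.inl ⟨q, hq, hle⟩
        · simp only [List.mem_singleton] at hq
          subst hq
          right
          simp only [abs_le] at hle
          omega

-- ===== VERDICT (by name: the statement is the Claim_ definition above) =====
theorem max_explosion_radii_spec : Claim_equal_max_explosion_radii := by
  intro bombs _
  unfold Spec_max_explosion_radii max_explosion_radii max_explosion_radii_alt
  apply maxExp_loop_eq
  · intro p hp
    rw [PySem.List.mem_sorted, PySem.List.mem_enumerate_iff] at hp
    obtain ⟨k, hk, rfl⟩ := hp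
    refine ⟨by simp, ?_⟩; simp; omega
  · intro j _ _
    simp [PySem.Set.empty]
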